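-- pv_equiv track=rewrite | github.com/shayne-fletcher/monarch-1 | python/tests/test_remotemount.py | _simulate_tree
-- ===== SOURCE A (Python) =====
-- def _simulate_tree(
--     leader_rank: int, peer_ranks: list[int]
-- ) -> list[list[tuple[int, int]]]:
--     """Reproduce the tree fan-out logic from _transfer_fanout.
--
--     Returns list of levels, each level is a list of (src, dst) pairs.
--     """
--     have_data = [leader_rank]
--     need_data = list(peer_ranks)
--     levels = []
--
--     while need_data:
--         pairs = []
--         for src_rank in have_data:
--             if not need_data:
--                 break
--             dst_rank = need_data.pop(0)
--             pairs.append((src_rank, dst_rank))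
--         levels.append(pairs)
--         for _, dst in pairs:
--             have_data.append(dst)
--
--     return levels
-- ===== SOURCE B (Python) =====
-- def _simulate_tree(
--     leader_rank: int, peer_ranks: list[int]
-- ) -> list[list[tuple[int, int]]]:
--     """Tree fan-out levels via one indexed array and counters (no pop(0))."""
--     holders = [leader_rank] + list(peer_ranks)
--     n = len(holders)
--     count = 1      # holders that currently have the data
--     next_dst = 1   # index of next unserved peer
--     levels = []
--     while next_dst < n:
--         take = min(count, n - next_dst)
--         pairs = [(holders[j], holders[next_dst + j]) for j in range(take)]
--         levels.append(pairs)
--         next_dst += take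
--         count += take
--     return levels
-- ===== Notes on version B (the rewrite author's own statement) =====
-- stated objective: faster
-- what changed: Replaces the growing have_data list and O(n) pop(0) queue with a single combined holders array plus integer counters and min() arithmetic, building each level by direct indexing.
import Mathlib
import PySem

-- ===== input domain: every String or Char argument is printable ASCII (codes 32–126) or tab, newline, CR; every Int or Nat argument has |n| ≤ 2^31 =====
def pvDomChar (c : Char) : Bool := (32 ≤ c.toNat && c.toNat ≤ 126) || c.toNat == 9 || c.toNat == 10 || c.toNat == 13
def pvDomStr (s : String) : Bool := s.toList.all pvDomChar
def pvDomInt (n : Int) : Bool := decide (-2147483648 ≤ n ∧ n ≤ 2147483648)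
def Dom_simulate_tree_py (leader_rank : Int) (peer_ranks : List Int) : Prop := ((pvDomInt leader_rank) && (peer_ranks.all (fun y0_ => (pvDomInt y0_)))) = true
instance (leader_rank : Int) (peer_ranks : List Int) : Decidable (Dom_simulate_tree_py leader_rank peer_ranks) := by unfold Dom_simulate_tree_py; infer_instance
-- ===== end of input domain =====

-- B replaces A's growing have_data list and repeated pop(0) on need_data by one combined
-- holders array with integer counters and min() arithmetic (objective: faster).

-- ===== PORT A =====
-- the inner `for src_rank in have_data: … need_data.pop(0) …` loop of A
def innerLoopA : List Int → List Int → List (Int × Int) → List (Int × Int) × List Int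
  | [], nd, pairs => (pairs, nd)
  | _ :: _, [], pairs => (pairs, [])              -- `if not need_data: break`
  | src :: rest, dst :: nd', pairs => innerLoopA rest nd' (pairs ++ [(src, dst)])

-- the `while need_data:` loop of A (fuel = |need_data| only makes the loop total:
-- each pass removes at least one element of need_data, exactly as in the Python)
def aLoop : Nat → List Int → List Int → List (List (Int × Int)) → List (List (Int × Int))
  | 0, _, _, levels => levels
  | f + 1, hd, nd, levels =>
    if nd = [] then levels
    else
      aLoop f (hd ++ (innerLoopA hd nd []).1.map Prod.snd)
        (innerLoopA hd nd []).2 (levels ++ [(innerLoopA hd nd []).1])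

def simulate_tree_py (leader_rank : Int) (peer_ranks : List Int) : List (List (Int × Int)) :=
  aLoop peer_ranks.length [leader_rank] peer_ranks []

-- ===== PORT B =====
-- the `while next_dst < n:` loop of B (fuel = number of unserved peers only makes
-- the loop total: next_dst grows by at least one per pass)
def bLoop : Nat → List Int → Nat → Nat → Nat → List (List (Int × Int)) → List (List (Int × Int))
  | 0, _, _, _, _, levels => levels
  | f + 1, holders, n, count, next_dst, levels =>
    if next_dst < n then
      bLoop f holders n (count + min count (n - next_dst)) (next_dst + min count (n - next_dst))
        (levels ++ [(List.range (min count (n - next_dst))).map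
          (fun j => (holders.getD j 0, holders.getD (next_dst + j) 0))])
    else levels

def simulate_tree_py_alt (leader_rank : Int) (peer_ranks : List Int) : List (List (Int × Int)) :=
  bLoop peer_ranks.length (leader_rank :: peer_ranks) (leader_rank :: peer_ranks).length 1 1 []

-- ===== PRECONDITION & SPEC =====
def Spec_simulate_tree_py (leader_rank : Int) (peer_ranks : List Int) (out : List (List (Int × Int))) : Prop := out = simulate_tree_py_alt leader_rank peer_ranks
instance (leader_rank : Int) (peer_ranks : List Int) (out : List (List (Int × Int))) : Decidable (Spec_simulate_tree_py leader_rank peer_ranks out) := by unfold Spec_simulate_tree_py; infer_instance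

-- ===== CLAIM (what is proved, stated in full; the proofs are below) =====
def Claim_equal_simulate_tree_py : Prop := ∀ (leader_rank : Int) (peer_ranks : List Int), Dom_simulate_tree_py leader_rank peer_ranks → Spec_simulate_tree_py leader_rank peer_ranks (simulate_tree_py leader_rank peer_ranks)

-- ===== LEMMAS AND PROOFS =====
theorem innerLoopA_spec : ∀ (hd nd : List Int) (acc : List (Int × Int)),
    innerLoopA hd nd acc = (acc ++ hd.zip nd, nd.drop hd.length) := by
  intro hd
  induction hd with
  | nil => intro nd acc; simp [innerLoopA]
  | cons s r ih =>
    intro nd acc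
    cases nd with
    | nil => simp [innerLoopA]
    | cons d nd' => simp [innerLoopA, ih]

theorem map_snd_zip (l1 l2 : List Int) :
    (l1.zip l2).map Prod.snd = l2.take l1.length := by
  induction l1 generalizing l2 with
  | nil => simp
  | cons a t ih => cases l2 <;> simp [ih]

theorem zip_take_drop_eq_range (holders : List Int) (k : Nat) (hk : k ≤ holders.length) :
    (holders.take k).zip (holders.drop k)
      = (List.range (min k (holders.length - k))).map
          (fun j => (holders.getD j 0, holders.getD (k + j) 0)) := by
  apply List.ext_getElem
  · simp
  · intro i h1 h2
    have hi : i < min k (holders.length - k) := by simpa using h2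
    have hik : i < holders.length := by omega
    have hki : k + i < holders.length := by omega
    simp [List.getElem_zip, List.getD_eq_getElem?_getD, hik, hki]

theorem loop_eq : ∀ (f : Nat) (holders : List Int) (k : Nat) (levels : List (List (Int × Int))),
    1 ≤ k → k ≤ holders.length → holders.length - k ≤ f →
    aLoop f (holders.take k) (holders.drop k) levels = bLoop f holders holders.length k k levels := by
  intro f
  induction f with
  | zero => intro holders k levels _ _ _; rfl
  | succ f IH =>
    intro holders k levels h1 h2 hf
    by_cases hlt : k < holders.length
    · have hn : ¬ holders.drop k = [] := by
        simp only [List.drop_eq_nil_iff]; omega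
      rw [aLoop, if_neg hn, bLoop, if_pos hlt]
      have hlen : (holders.take k).length = k := by simp; omega
      have hpairs : (innerLoopA (holders.take k) (holders.drop k) []).1
          = (List.range (min k (holders.length - k))).map
              (fun j => (holders.getD j 0, holders.getD (k + j) 0)) := by
        rw [innerLoopA_spec]; simpa using zip_take_drop_eq_range holders k h2
      have hnd : (innerLoopA (holders.take k) (holders.drop k) []).2
          = holders.drop (k + min k (holders.length - k)) := by
        rw [innerLoopA_spec]
        simp only [hlen, List.drop_drop]
        rcases Nat.le_total k (holders.length - k) with hle | hle
        · rw [min_eq_left hle]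
        · rw [min_eq_right hle]
          rw [List.drop_eq_nil_of_le (by omega), List.drop_eq_nil_of_le (by omega)]
      have hhave : holders.take k ++ (innerLoopA (holders.take k) (holders.drop k) []).1.map Prod.snd
          = holders.take (k + min k (holders.length - k)) := by
        rw [innerLoopA_spec]
        simp only [List.nil_append, map_snd_zip, hlen, ← List.take_add]
        rcases Nat.le_total k (holders.length - k) with hle | hle
        · rw [min_eq_left hle]
        · rw [min_eq_right hle]
          rw [List.take_of_length_le (by omega), List.take_of_length_le (by omega)]
      have hhave2 : holders.take k ++ ((List.range (min k (holders.length - k))).map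
            (fun j => (holders.getD j 0, holders.getD (k + j) 0))).map Prod.snd
          = holders.take (k + min k (holders.length - k)) := by
        rw [← hpairs]; exact hhave
      simp only [hpairs, hnd]
      simp only [hhave2]
      exact IH holders (k + min k (holders.length - k)) _ (by omega) (by omega) (by omega)
    · have hn : holders.drop k = [] := by simp only [List.drop_eq_nil_iff]; omega
      rw [aLoop, if_pos hn, bLoop, if_neg hlt]

-- ===== VERDICT (by name: the statement is the Claim_ definition above) =====
theorem simulate_tree_py_spec : Claim_equal_simulate_tree_py := by
  intro l p _
  show simulate_tree_py l p = simulate_tree_py_alt l p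
  unfold simulate_tree_py simulate_tree_py_alt
  exact loop_eq p.length (l :: p) 1 [] (by omega) (by simp) (by simp)
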